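-- pv_equiv track=rewrite | github.com/jfechete/NCGenerator | data_classes.py | _maximize_points
-- ===== SOURCE A (Python) =====
-- def _maximize_points(list_of_points):
--     points = sum(list_of_points, [])
--     points.sort()
--     cr_point = 0
--     while cr_point < len(points) - 1:
--         if points[cr_point][0] == points[cr_point + 1][0]:
--             del points[cr_point]
--         else:
--             cr_point += 1
--     return points
-- ===== SOURCE B (Python) =====
-- def _maximize_points(list_of_points):
--     pts = sorted(p for ps in list_of_points for p in ps)
--     out = []
--     for p in pts:
--         if out and out[-1][0] == p[0]:
--             out[-1] = p
--         else:
--             out.append(p)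
--     return out
-- ===== Notes on version B (the rewrite author's own statement) =====
-- stated objective: faster
-- what changed: Replaces the quadratic while-loop that repeatedly deletes from the sorted list with a single linear pass that keeps the last point of each equal-first-coordinate group.
import Mathlib
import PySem

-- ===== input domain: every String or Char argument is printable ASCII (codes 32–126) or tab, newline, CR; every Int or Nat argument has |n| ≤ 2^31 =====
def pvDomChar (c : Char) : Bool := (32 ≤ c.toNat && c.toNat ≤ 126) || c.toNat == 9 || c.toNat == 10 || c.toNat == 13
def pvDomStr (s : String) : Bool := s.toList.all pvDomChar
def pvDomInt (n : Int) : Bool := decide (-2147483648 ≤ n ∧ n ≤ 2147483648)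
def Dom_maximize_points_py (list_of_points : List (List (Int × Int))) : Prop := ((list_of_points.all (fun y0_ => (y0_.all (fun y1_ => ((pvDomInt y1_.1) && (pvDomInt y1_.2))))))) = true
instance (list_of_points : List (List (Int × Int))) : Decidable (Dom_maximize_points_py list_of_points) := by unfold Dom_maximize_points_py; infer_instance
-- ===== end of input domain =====

-- B replaces A's quadratic delete-in-place dedup loop with one linear pass keeping the last point of each equal-first-coordinate group (faster).
-- ===== PORT A =====
-- the while-loop: at equal first coordinates delete points[cr] (stay), else advance;
-- the untouched prefix makes this the structural recursion below
def pvLoopA : List (Int × Int) → List (Int × Int)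
  | [] => []
  | [x] => [x]
  | x :: y :: rest => if x.1 = y.1 then pvLoopA (y :: rest) else x :: pvLoopA (y :: rest)

def maximize_points_py (list_of_points : List (List (Int × Int))) : List (Int × Int) :=
  pvLoopA (PySem.List.sorted2 list_of_points.flatten (fun p => p.1) (fun p => p.2))

-- ===== PORT B =====
-- the for-loop body: replace out[-1] when first coordinates match, else append;
-- out is kept reversed in the accumulator and reversed at the end
def pvStepB (acc : List (Int × Int)) (p : Int × Int) : List (Int × Int) :=
  match acc with
  | q :: t => if q.1 = p.1 then p :: t else p :: q :: t
  | [] => [p]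

def maximize_points_py_alt (list_of_points : List (List (Int × Int))) : List (Int × Int) :=
  ((PySem.List.sorted2 list_of_points.flatten (fun p => p.1) (fun p => p.2)).foldl pvStepB []).reverse

-- ===== PRECONDITION & SPEC =====
def Spec_maximize_points_py (list_of_points : List (List (Int × Int))) (out : List (Int × Int)) : Prop := out = maximize_points_py_alt list_of_points
instance (list_of_points : List (List (Int × Int))) (out : List (Int × Int)) : Decidable (Spec_maximize_points_py list_of_points out) := by unfold Spec_maximize_points_py; infer_instance

-- ===== CLAIM (what is proved, stated in full; the proofs are below) =====
def Claim_equal_maximize_points_py : Prop := ∀ (list_of_points : List (List (Int × Int))), Dom_maximize_points_py list_of_points → Spec_maximize_points_py list_of_points (maximize_points_py list_of_points)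

-- ===== LEMMAS AND PROOFS =====

-- ===== VERDICT (by name: the statement is the Claim_ definition above) =====
theorem pvFold_loopA (l : List (Int × Int)) : ∀ (x : Int × Int) (t : List (Int × Int)),
    (l.foldl pvStepB (x :: t)).reverse = t.reverse ++ pvLoopA (x :: l) := by
  induction l with
  | nil => intro x t; simp [pvLoopA]
  | cons p l ih =>
      intro x t
      by_cases h : x.1 = p.1
      · simp [pvStepB, h, pvLoopA, ih]
      · simp [pvStepB, h, pvLoopA, ih]

theorem maximize_points_py_spec : Claim_equal_maximize_points_py := by
  intro l _
  unfold Spec_maximize_points_py maximize_points_py maximize_points_py_alt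
  cases hs : PySem.List.sorted2 l.flatten (fun p => p.1) (fun p => p.2) with
  | nil => simp [pvLoopA]
  | cons x r => simp [List.foldl_cons, pvStepB, pvFold_loopA]
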